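-- pv_equiv track=rewrite | github.com/hyunkoome/Study_CodingTest | 02_LeetCode/01_LeetCode75/02. Two Pointers/1679. Max Number of K-Sum Pairs [☆].py | maxOperationsGPT
-- ===== SOURCE A (Python) =====
-- from typing import List
-- from collections import Counter
--
-- def maxOperationsGPT(nums: List[int], k: int) -> int:
--     """
--     elif x == k - x가 아니라 elif x < k - x가 맞습니다.
--
--     이 조건이 필요한 이유는 x와 k - x가 서로 다른 두 수일 때만 중복해서 쌍을 계산하지 않기 위해서입니다.
--     elif x < k - x는 다음과 같은 이유로 적절합니다:
--
--     중복 계산 방지: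
--
--     예를 들어, x = 2, k = 5일 때 k - x = 3입니다. x < k - x이므로 2와 3 쌍을 한 번만 계산하게 됩니다.
--     만약 elif x == k - x를 사용하면 x < k - x 조건이 없어 중복 계산이 발생할 수 있어요.
--     Counter는 숫자 순서대로 순회하기 때문에 2와 3 쌍을 계산하고, 나중에 3을 만났을 때 3과 2 쌍을 다시 계산하게 됩니다.
--
--     특수한 케이스:
--
--     elif x == k - x는 x * 2 = k일 때, 즉 k가 짝수이며 k / 2로 쌍을 이룰 때만 참입니다.
--     이 경우는 elif x * 2 == k 조건으로 따로 처리해주고 있기 때문에 elif x < k - x가 필요한 것이죠.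
--     결론적으로, elif x < k - x는 중복 계산을 방지하면서 유효한 쌍만 계산하도록 합니다.
--     """
--     counter = Counter(nums)
--     operations = 0
--
--     for x in counter:
--         if x * 2 == k:  # x와 x로 쌍을 이루는 경우
--             operations += counter[x] // 2
--         elif x < k - x:  # 서로 다른 두 수로 쌍을 이루는 경우만 계산
--             operations += min(counter[x], counter[k - x])
--
--     return operations
-- ===== SOURCE B (Python) =====
-- from typing import List
-- from collections import deque
--
--
-- def maxOperationsGPT(nums: List[int], k: int) -> int:
--     # Sort a copy and sweep with two pointers (deque ends) instead of a counter scan.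
--     arr = deque(sorted(nums))
--     ops = 0
--     while len(arr) >= 2:
--         s = arr[0] + arr[-1]
--         if s == k:
--             arr.popleft()
--             arr.pop()
--             ops += 1
--         elif s < k:
--             arr.popleft()
--         else:
--             arr.pop()
--     return ops
-- ===== Notes on version B (the rewrite author's own statement) =====
-- stated objective: alternative
-- what changed: Replaces the Counter-and-distinct-key scan with sorting a copy and a two-pointer sweep consuming the sorted list from both ends.
import Mathlib
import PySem

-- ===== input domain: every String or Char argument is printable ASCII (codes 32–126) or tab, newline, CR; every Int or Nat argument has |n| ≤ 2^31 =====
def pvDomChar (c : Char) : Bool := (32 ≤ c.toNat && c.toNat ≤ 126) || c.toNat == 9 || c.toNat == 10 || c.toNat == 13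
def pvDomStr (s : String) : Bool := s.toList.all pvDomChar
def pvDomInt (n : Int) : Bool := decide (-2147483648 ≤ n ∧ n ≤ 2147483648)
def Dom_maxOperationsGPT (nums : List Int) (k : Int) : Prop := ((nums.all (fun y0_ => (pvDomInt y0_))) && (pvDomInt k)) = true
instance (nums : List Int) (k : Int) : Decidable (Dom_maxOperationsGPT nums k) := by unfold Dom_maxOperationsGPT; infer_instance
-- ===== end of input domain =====

-- B replaces A's Counter-and-distinct-key scan by sorting a copy and a two-pointer sweep (alternative algorithm; neither version mutates nums).

-- ===== PORT A =====
-- counter = Counter(nums); for x in counter: branch on x*2 == k / x < k - x.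
-- Counter's lookup of a missing key returns 0, hence getD _ 0; '//' is Int.floordiv.
def maxOperationsGPT (nums : List Int) (k : Int) : Int :=
  let counter := PySem.Dict.counter nums
  (PySem.Dict.keys counter).foldl (fun operations x =>
    if x * 2 = k then operations + PySem.Int.floordiv (counter.getD x 0) 2
    else if x < k - x then operations + min (counter.getD x 0) (counter.getD (k - x) 0)
    else operations) 0

-- ===== PORT B =====
-- while len(arr) >= 2: s = arr[0] + arr[-1]; popleft/pop as in Source B.
-- arr[0] is headI and arr[-1] is getLastD 0; both indices are in range exactly when 2 ≤ length.
def twoPtrGo (k : Int) (arr : List Int) : Int :=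
  if h : 2 ≤ arr.length then
    let a := arr.headI
    let b := arr.getLastD 0
    if a + b = k then twoPtrGo k arr.tail.dropLast + 1
    else if a + b < k then twoPtrGo k arr.tail
    else twoPtrGo k arr.dropLast
  else 0
termination_by arr.length
decreasing_by
  · simp only [List.length_dropLast, List.length_tail]; omega
  · simp only [List.length_tail]; omega
  · simp only [List.length_dropLast]; omega

def maxOperationsGPT_alt (nums : List Int) (k : Int) : Int :=
  twoPtrGo k (PySem.List.sorted nums (fun x => x) false)

-- ===== PRECONDITION & SPEC =====
def Spec_maxOperationsGPT (nums : List Int) (k : Int) (out : Int) : Prop := out = maxOperationsGPT_alt nums k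
instance (nums : List Int) (k : Int) (out : Int) : Decidable (Spec_maxOperationsGPT nums k out) := by unfold Spec_maxOperationsGPT; infer_instance

-- ===== CLAIM (what is proved, stated in full; the proofs are below) =====
def Claim_equal_maxOperationsGPT : Prop := ∀ (nums : List Int) (k : Int), Dom_maxOperationsGPT nums k → Spec_maxOperationsGPT nums k (maxOperationsGPT nums k)

-- ===== LEMMAS AND PROOFS =====
-- Both ports are shown equal to FN l k = Σ_(x ∈ distinct values) gN l k x, the per-value
-- pair count A computes per Counter key: A via the PySem Counter lemmas, B by strong
-- induction on the sorted list (each two-pointer step preserves FN, or removes one pair).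

-- per-distinct-value pair count (Nat form of A's per-key addend)
def gN (l : List Int) (k x : Int) : Nat :=
  if x * 2 = k then l.count x / 2
  else if x < k - x then min (l.count x) (l.count (k - x))
  else 0

-- total number of k-sum pairs, as a sum over the distinct values
def FN (l : List Int) (k : Int) : Nat := ∑ x ∈ l.toFinset, gN l k x

theorem gN_eq_zero_of_not_mem {l : List Int} {k x : Int} (hx : x ∉ l) : gN l k x = 0 := by
  have h0 : l.count x = 0 := List.count_eq_zero.mpr hx
  unfold gN
  split_ifs with h1 h2 <;> simp [h0]

theorem FN_eq_sum_superset {l : List Int} {k : Int} {u : Finset Int}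
    (hu : l.toFinset ⊆ u) : ∑ x ∈ u, gN l k x = FN l k := by
  unfold FN
  exact (Finset.sum_subset hu (fun x _ hx => gN_eq_zero_of_not_mem (by simpa using hx))).symm

theorem FN_perm {l l' : List Int} {k : Int} (hp : l.Perm l') : FN l k = FN l' k := by
  unfold FN
  rw [List.toFinset_eq_of_perm l l' hp]
  refine Finset.sum_congr rfl (fun x _ => ?_)
  unfold gN
  rw [hp.count_eq, hp.count_eq]

theorem count_cons_eq (a x : Int) (t : List Int) :
    (a :: t).count x = t.count x + (if x = a then 1 else 0) := by
  by_cases h : x = a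
  · subst h; simp [List.count_cons]
  · have : (a : Int) ≠ x := fun hh => h hh.symm
    simp [List.count_cons, this, h]

theorem count_concat_eq (b x : Int) (t : List Int) :
    (t ++ [b]).count x = t.count x + (if x = b then 1 else 0) := by
  by_cases h : x = b
  · subst h; simp [List.count_append]
  · have : (b : Int) ≠ x := fun hh => h hh.symm
    simp [List.count_append, List.count_singleton, this, h]

theorem FN_drop_min (a : Int) (t : List Int) (k b : Int)
    (ha : ∀ y ∈ t, a ≤ y) (hb : ∀ y ∈ a :: t, y ≤ b) (hmem : b ∈ a :: t)
    (hab : a + b < k) : FN (a :: t) k = FN t k := by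
  have hble : a ≤ b := by
    rcases List.mem_cons.mp hmem with h | h
    · omega
    · exact ha b h
  have hpt : ∀ x ∈ (a :: t).toFinset, gN (a :: t) k x = gN t k x := by
    intro x hx
    have hxl : x ∈ a :: t := List.mem_toFinset.mp hx
    by_cases hxa : x = a
    · have hka : (k - x) ∉ (a :: t) := by
        intro hm; have := hb _ hm; omega
      have hc1 : (a :: t).count (k - x) = 0 := List.count_eq_zero.mpr hka
      have hc2 : t.count (k - x) = 0 :=
        List.count_eq_zero.mpr (fun hm => hka (List.mem_cons_of_mem _ hm))
      unfold gN
      split_ifs <;> omega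
    · have hax : a ≤ x := ha x (by rcases List.mem_cons.mp hxl with h | h
                                   · exact absurd h hxa
                                   · exact h)
      have hcx : (a :: t).count x = t.count x := by
        rw [count_cons_eq, if_neg hxa]; omega
      by_cases hk : k - x = a
      · unfold gN
        split_ifs <;> omega
      · have hck : (a :: t).count (k - x) = t.count (k - x) := by
          rw [count_cons_eq, if_neg hk]; omega
        unfold gN
        rw [hcx, hck]
  calc FN (a :: t) k = ∑ x ∈ (a :: t).toFinset, gN (a :: t) k x := rfl
    _ = ∑ x ∈ (a :: t).toFinset, gN t k x := Finset.sum_congr rfl hpt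
    _ = FN t k := FN_eq_sum_superset (by
        intro x hx; simp only [List.mem_toFinset] at hx ⊢; exact List.mem_cons_of_mem _ hx)

theorem FN_drop_max (t : List Int) (k a b : Int)
    (ha : ∀ y ∈ t ++ [b], a ≤ y) (hmem : a ∈ t ++ [b])
    (hab : k < a + b) : FN (t ++ [b]) k = FN t k := by
  have hble : a ≤ b := ha b (by simp)
  have hpt : ∀ x ∈ (t ++ [b]).toFinset, gN (t ++ [b]) k x = gN t k x := by
    intro x hx
    have hxl : x ∈ t ++ [b] := List.mem_toFinset.mp hx
    have hax : a ≤ x := ha x hxl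
    by_cases hxb : x = b
    · unfold gN
      split_ifs <;> omega
    · have hcx : (t ++ [b]).count x = t.count x := by
        rw [count_concat_eq, if_neg hxb]; omega
      by_cases hk : k - x = b
      · exact absurd hax (by omega)
      · have hck : (t ++ [b]).count (k - x) = t.count (k - x) := by
          rw [count_concat_eq, if_neg hk]; omega
        unfold gN
        rw [hcx, hck]
  calc FN (t ++ [b]) k = ∑ x ∈ (t ++ [b]).toFinset, gN (t ++ [b]) k x := rfl
    _ = ∑ x ∈ (t ++ [b]).toFinset, gN t k x := Finset.sum_congr rfl hpt
    _ = FN t k := FN_eq_sum_superset (by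
        intro x hx; simp only [List.mem_toFinset] at hx ⊢; exact List.mem_append_left _ hx)

theorem FN_match (a : Int) (mid : List Int) (k b : Int)
    (hmin : ∀ y ∈ a :: (mid ++ [b]), a ≤ y) (hmax : ∀ y ∈ a :: (mid ++ [b]), y ≤ b)
    (heq : a + b = k) : FN (a :: (mid ++ [b])) k = FN mid k + 1 := by
  have hcount : ∀ y, (a :: (mid ++ [b])).count y
      = mid.count y + (if y = a then 1 else 0) + (if y = b then 1 else 0) := by
    intro y
    rw [count_cons_eq, count_concat_eq]
    omega
  have hab : a ≤ b := hmax a (by simp)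
  by_cases hb : a = b
  · -- all elements equal a, k = 2a
    subst hb
    have hall : ∀ y ∈ a :: (mid ++ [a]), y = a := fun y hy =>
      le_antisymm (hmax y hy) (hmin y hy)
    have hu : (a :: (mid ++ [a])).toFinset = {a} := by
      ext x
      simp only [List.mem_toFinset, Finset.mem_singleton]
      constructor
      · exact fun h => hall x h
      · intro h; subst h; simp
    have hmidsub : mid.toFinset ⊆ ({a} : Finset Int) := by
      intro x hx
      rw [← hu]; simp at hx ⊢
      tauto
    have hca : (a :: (mid ++ [a])).count a = mid.count a + 2 := by rw [hcount]; simp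
    have hga : gN (a :: (mid ++ [a])) k a = mid.count a / 2 + 1 := by
      unfold gN; rw [if_pos (by omega), hca]; omega
    have hgma : gN mid k a = mid.count a / 2 := by
      unfold gN; rw [if_pos (by omega)]
    calc FN (a :: (mid ++ [a])) k = ∑ x ∈ {a}, gN (a :: (mid ++ [a])) k x := by rw [FN, hu]
      _ = mid.count a / 2 + 1 := by rw [Finset.sum_singleton, hga]
      _ = (∑ x ∈ ({a} : Finset Int), gN mid k x) + 1 := by rw [Finset.sum_singleton, hgma]
      _ = FN mid k + 1 := by rw [FN_eq_sum_superset hmidsub]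
  · have halt : a < b := lt_of_le_of_ne hab hb
    have hka : k - a = b := by omega
    have hmemu : a ∈ (a :: (mid ++ [b])).toFinset := by simp
    have hga : gN (a :: (mid ++ [b])) k a = gN mid k a + 1 := by
      have hc1 : (a :: (mid ++ [b])).count a = mid.count a + 1 := by
        rw [hcount]; split_ifs <;> omega
      have hc2 : (a :: (mid ++ [b])).count b = mid.count b + 1 := by
        rw [hcount]; split_ifs <;> omega
      unfold gN
      rw [if_neg (show ¬ a * 2 = k by omega), if_neg (show ¬ a * 2 = k by omega),
        if_pos (show a < k - a by omega), if_pos (show a < k - a by omega), hka, hc1, hc2]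
      simp only [Nat.min_def]
      split_ifs <;> omega
    have hpt : ∀ x ∈ (a :: (mid ++ [b])).toFinset.erase a,
        gN (a :: (mid ++ [b])) k x = gN mid k x := by
      intro x hx
      have hxa : x ≠ a := (Finset.mem_erase.mp hx).1
      have hxl : x ∈ a :: (mid ++ [b]) :=
        List.mem_toFinset.mp (Finset.mem_erase.mp hx).2
      have hxle : x ≤ b := hmax x hxl
      have hxge : a ≤ x := hmin x hxl
      by_cases hxb : x = b
      · unfold gN
        split_ifs <;> omega
      · have hc1 : (a :: (mid ++ [b])).count x = mid.count x := by
          rw [hcount]; split_ifs <;> omega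
        by_cases hk1 : k - x = a
        · exact absurd (show x = b by omega) hxb
        · by_cases hk2 : k - x = b
          · exact absurd (show x = a by omega) hxa
          · have hc2 : (a :: (mid ++ [b])).count (k - x) = mid.count (k - x) := by
              rw [hcount]; split_ifs <;> omega
            unfold gN
            rw [hc1, hc2]
    have hmidsub : mid.toFinset ⊆ (a :: (mid ++ [b])).toFinset := by
      intro x hx; simp at hx ⊢; tauto
    calc FN (a :: (mid ++ [b])) k
        = gN (a :: (mid ++ [b])) k a
          + ∑ x ∈ (a :: (mid ++ [b])).toFinset.erase a, gN (a :: (mid ++ [b])) k x :=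
          (Finset.add_sum_erase _ _ hmemu).symm
      _ = gN mid k a + 1 + ∑ x ∈ (a :: (mid ++ [b])).toFinset.erase a, gN mid k x := by
          rw [hga, Finset.sum_congr rfl hpt]
      _ = (∑ x ∈ (a :: (mid ++ [b])).toFinset, gN mid k x) + 1 := by
          rw [← Finset.add_sum_erase _ _ hmemu]; omega
      _ = FN mid k + 1 := by rw [FN_eq_sum_superset hmidsub]

theorem portA_eq_FN (nums : List Int) (k : Int) :
    maxOperationsGPT nums k = (FN nums k : Int) := by
  unfold maxOperationsGPT
  simp only [PySem.Dict.keys_counter, PySem.Dict.getD_counter]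
  have hfun : (fun (operations : Int) (x : Int) =>
      if x * 2 = k then operations + PySem.Int.floordiv ((nums.count x : Nat) : Int) 2
      else if x < k - x then operations + min ((nums.count x : Nat) : Int) ((nums.count (k - x) : Nat) : Int)
      else operations)
      = fun operations x => operations + (gN nums k x : Int) := by
    funext ops x
    unfold gN
    split_ifs with h1 h2
    · rw [show (2 : Int) = ((2 : Nat) : Int) by norm_num, PySem.Int.floordiv_natCast]
    · rw [Nat.cast_min]
    · simp
  rw [hfun, PySem.List.foldl_add, zero_add]
  have hnd : (PySem.Set.ofList nums).Nodup := by
    rw [← PySem.List.dedup_eq_ofList]; exact PySem.List.nodup_dedup nums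
  have htf : (PySem.Set.ofList nums).toFinset = nums.toFinset := by
    ext x
    simp only [List.mem_toFinset, ← PySem.List.dedup_eq_ofList, PySem.List.mem_dedup]
  have hsum : FN nums k = ((PySem.Set.ofList nums).map (gN nums k)).sum := by
    rw [FN, ← htf, List.sum_toFinset _ hnd]
  rw [hsum]
  simp [Nat.cast_list_sum, List.map_map, Function.comp_def]

theorem FN_small (l : List Int) (k : Int) (hl : l.length ≤ 1) : FN l k = 0 := by
  match l, hl with
  | [], _ => simp [FN]
  | [x], _ =>
    have : ([x] : List Int).toFinset = {x} := by simp
    rw [FN, this, Finset.sum_singleton]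
    unfold gN
    split_ifs with h1 h2
    · simp [List.count_singleton]
    · have : (k - x) ∉ [x] := by simp; omega
      rw [List.count_eq_zero.mpr this]
      simp
    · rfl

theorem twoPtrGo_eq_FN (k : Int) : ∀ (n : Nat) (l : List Int), l.length ≤ n →
    l.Pairwise (· ≤ ·) → twoPtrGo k l = (FN l k : Int) := by
  intro n
  induction n with
  | zero =>
    intro l hl _
    have : l = [] := List.length_eq_zero_iff.mp (Nat.le_zero.mp hl)
    subst this
    rw [twoPtrGo]
    simp [FN]
  | succ n ih =>
    intro l hl hs
    by_cases h2 : 2 ≤ l.length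
    · cases l with
      | nil => simp at h2
      | cons a t =>
        rcases (List.eq_nil_or_concat t) with rfl | ⟨mid, b, rfl⟩
        · simp at h2
        · -- l = a :: (mid ++ [b])
          simp only [List.concat_eq_append] at hl hs h2 ⊢
          have hhead : (a :: (mid ++ [b])).headI = a := rfl
          have hlast : (a :: (mid ++ [b])).getLastD 0 = b := by
            show ((a :: mid) ++ [b]).getLastD 0 = b
            rw [List.getLastD_concat]
          have htaildrop : ((a :: (mid ++ [b])).tail).dropLast = mid := by
            rw [List.tail_cons, List.dropLast_concat]
          have hdrop : (a :: (mid ++ [b])).dropLast = a :: mid := by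
            show ((a :: mid) ++ [b]).dropLast = a :: mid
            rw [List.dropLast_concat]
          have hmin : ∀ y ∈ mid ++ [b], a ≤ y := (List.pairwise_cons.mp hs).1
          have hst : (mid ++ [b]).Pairwise (· ≤ ·) := (List.pairwise_cons.mp hs).2
          have hmid : mid.Pairwise (· ≤ ·) := ((List.pairwise_append.mp hst)).1
          have hmaxm : ∀ y ∈ mid, y ≤ b := by
            intro y hy
            exact (List.pairwise_append.mp hst).2.2 y hy b (by simp)
          have hab : a ≤ b := hmin b (by simp)
          have hamid : (a :: mid).Pairwise (· ≤ ·) := by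
            rw [List.pairwise_cons]
            exact ⟨fun y hy => hmin y (List.mem_append_left _ hy), hmid⟩
          have hminall : ∀ y ∈ a :: (mid ++ [b]), a ≤ y := by
            intro y hy
            rcases List.mem_cons.mp hy with rfl | hy'
            · exact le_refl y
            · exact hmin y hy'
          have hmaxall : ∀ y ∈ a :: (mid ++ [b]), y ≤ b := by
            intro y hy
            rcases List.mem_cons.mp hy with rfl | hy'
            · exact hab
            · rcases List.mem_append.mp hy' with h | h
              · exact hmaxm y h
              · simp at h; omega
          have hlen : (a :: (mid ++ [b])).length = mid.length + 2 := by simp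
          rw [twoPtrGo, dif_pos h2]
          simp only [hhead, hlast, htaildrop, hdrop]
          split_ifs with hc1 hc2
          · -- a + b = k
            rw [ih mid (by simp at hl; omega) hmid, FN_match a mid k b hminall hmaxall hc1]
            push_cast
            ring
          · -- a + b < k
            rw [List.tail_cons, ih (mid ++ [b]) (by simp at hl ⊢; omega) hst,
              FN_drop_min a (mid ++ [b]) k b hmin hmaxall (by simp) hc2]
          · -- k < a + b
            rw [ih (a :: mid) (by simp at hl ⊢; omega) hamid]
            have h6 : FN (a :: (mid ++ [b])) k = FN (a :: mid) k :=
              FN_drop_max (a :: mid) k a b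
                (by intro y hy; exact hminall y hy) (by simp) (by omega)
            rw [h6]
    · rw [twoPtrGo, dif_neg h2, FN_small l k (by omega)]
      simp

-- ===== VERDICT (by name: the statement is the Claim_ definition above) =====
theorem maxOperationsGPT_spec : Claim_equal_maxOperationsGPT := by
  intro nums k _
  show _ = _
  have hs := PySem.List.sorted_pairwise (xs := nums) (key := fun (x : Int) => x)
  have hperm : (PySem.List.sorted nums (fun x => x) false).Perm nums :=
    PySem.List.sorted_perm ..
  have hb := twoPtrGo_eq_FN k (PySem.List.sorted nums (fun x => x) false).length
      (PySem.List.sorted nums (fun x => x) false) le_rfl hs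
  rw [portA_eq_FN, maxOperationsGPT_alt, hb, FN_perm hperm]
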